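-- pv_equiv track=rewrite | github.com/pypi-data/pypi-mirror-41 | packages/ngramtg/ngramtg-2019.1.tar.gz/ngramtg-2019.1/ngramtg/ngram.py | preprocess_corpus
-- ===== SOURCE A (Python) =====
-- def preprocess_corpus(corpus=None):
--     """Removes newlines and adds padding to punctuation characters."""
--     if not corpus:
--         return
--
--     for index, entry in enumerate(corpus):
--         entry = entry.replace(",", " ,")
--         entry = entry.replace(".", " .")
--         entry = entry.replace("?", " ?")
--         entry = entry.replace("!", " !")
--         corpus[index] = entry
--     return corpus
-- ===== SOURCE B (Python) =====
-- PUNCT = frozenset(",.?!")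
--
--
-- def preprocess_corpus(corpus=None):
--     """Pads punctuation in one per-character pass per entry (mutates corpus in place)."""
--     if not corpus:
--         return
--
--     for index, entry in enumerate(corpus):
--         corpus[index] = "".join(
--             " " + ch if ch in PUNCT else ch for ch in entry
--         )
--     return corpus
-- ===== Notes on version B (the rewrite author's own statement) =====
-- stated objective: simpler
-- what changed: Replaces the four sequential str.replace passes with a single per-character scan that emits ' '+ch for each punctuation character, joined once per entry.
import Mathlib
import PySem

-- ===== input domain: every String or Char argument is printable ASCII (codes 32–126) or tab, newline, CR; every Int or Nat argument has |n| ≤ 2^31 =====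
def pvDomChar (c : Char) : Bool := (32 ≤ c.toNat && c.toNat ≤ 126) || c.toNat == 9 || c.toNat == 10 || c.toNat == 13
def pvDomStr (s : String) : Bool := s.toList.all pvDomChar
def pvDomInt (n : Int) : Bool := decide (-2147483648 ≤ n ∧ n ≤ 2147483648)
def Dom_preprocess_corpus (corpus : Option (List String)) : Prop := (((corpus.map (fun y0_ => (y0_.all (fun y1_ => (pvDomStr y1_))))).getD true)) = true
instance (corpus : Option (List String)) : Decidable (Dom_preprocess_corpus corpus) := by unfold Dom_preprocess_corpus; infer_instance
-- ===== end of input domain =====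

-- B replaces A's four sequential str.replace passes with one per-character scan per entry
-- (objective: simpler). Python A and B mutate the list in place; the claim is about the return value
-- (B performs the same mutation).


-- ===== PORT A =====
-- A: 'if not corpus: return' then four str.replace passes per entry, written back by index.
def preprocess_corpus (corpus : Option (List String)) : Option (List String) :=
  match corpus with
  | none => none
  | some xs =>
    if xs = [] then none
    else
      some (xs.map (fun entry =>
        let e1 := PySem.Str.replace entry "," " ,"
        let e2 := PySem.Str.replace e1 "." " ."
        let e3 := PySem.Str.replace e2 "?" " ?"
        let e4 := PySem.Str.replace e3 "!" " !"
        e4))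

-- ===== PORT B =====
-- B: one per-character scan per entry: emit ' '+ch for ch in ",.?!", else ch, joined once.
def pvPad (c : Char) : List Char :=
  if c ∈ [',', '.', '?', '!'] then [' ', c] else [c]

def preprocess_corpus_alt (corpus : Option (List String)) : Option (List String) :=
  match corpus with
  | none => none
  | some xs =>
    if xs = [] then none
    else some (xs.map (fun entry => String.mk (entry.toList.flatMap pvPad)))

-- ===== PRECONDITION & SPEC =====
def Spec_preprocess_corpus (corpus : Option (List String)) (out : Option (List String)) : Prop := out = preprocess_corpus_alt corpus
instance (corpus : Option (List String)) (out : Option (List String)) : Decidable (Spec_preprocess_corpus corpus out) := by unfold Spec_preprocess_corpus; infer_instance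

-- ===== CLAIM (what is proved, stated in full; the proofs are below) =====
def Claim_equal_preprocess_corpus : Prop := ∀ (corpus : Option (List String)), Dom_preprocess_corpus corpus → Spec_preprocess_corpus corpus (preprocess_corpus corpus)

-- ===== LEMMAS AND PROOFS =====

-- single-character replace is a flatMap over the characters
theorem replace_go_single (p : Char) (new : List Char) :
    ∀ (l : List Char) (fuel : Nat) (acc : List Char), l.length ≤ fuel →
      PySem.Chars.replace.go [p] new fuel l acc
        = acc.reverse ++ l.flatMap (fun c => if c = p then new else [c]) := by
  intro l
  induction l with
  | nil =>
    intro fuel acc _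
    cases fuel <;> simp [PySem.Chars.replace.go]
  | cons c t ih =>
    intro fuel acc hf
    cases fuel with
    | zero => simp at hf
    | succ n =>
      rw [PySem.Chars.replace.go]
      by_cases hc : c = p
      · subst hc
        rw [if_pos (by simp)]
        simp only [List.length, List.drop]
        rw [ih n (new.reverse ++ acc) (by simpa using Nat.le_of_succ_le_succ hf)]
        simp
      · rw [if_neg (by simp [Ne.symm hc])]
        rw [ih n (c :: acc) (by simpa using Nat.le_of_succ_le_succ hf)]
        simp [hc]

theorem replace_single (p : Char) (new l : List Char) :
    PySem.Chars.replace l [p] new = l.flatMap (fun c => if c = p then new else [c]) := by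
  rw [PySem.Chars.replace]
  simp only [List.isEmpty]
  simpa using replace_go_single p new l l.length [] le_rfl

theorem entry_eq (entry : String) :
    (PySem.Str.replace (PySem.Str.replace (PySem.Str.replace (PySem.Str.replace entry "," " ,")
        "." " .") "?" " ?") "!" " !")
      = String.mk (entry.toList.flatMap pvPad) := by
  have h : ∀ (s old nw : String) (p : Char), old.toList = [p] →
      (PySem.Str.replace s old nw).toList
        = s.toList.flatMap (fun c => if c = p then nw.toList else [c]) := by
    intro s old nw p hp
    rw [PySem.Str.toList_replace, hp]
    exact replace_single p nw.toList s.toList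
  apply String.ext
  show _ = (String.mk (entry.toList.flatMap pvPad)).toList
  rw [h _ "!" " !" '!' rfl, h _ "?" " ?" '?' rfl, h _ "." " ." '.' rfl, h _ "," " ," ',' rfl]
  rw [show (String.mk (entry.toList.flatMap pvPad)).toList = entry.toList.flatMap pvPad from
        Eq.symm (String.ofList_eq.mp rfl)]
  simp only [List.flatMap_assoc]
  induction entry.toList with
  | nil => rfl
  | cons c cs ih => ?_
  simp only [List.flatMap_cons, ih, List.append_cancel_right_eq]
  by_cases h1 : c = ',' <;> by_cases h2 : c = '.' <;> by_cases h3 : c = '?' <;>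
    by_cases h4 : c = '!' <;> simp_all [pvPad]

-- ===== VERDICT (by name: the statement is the Claim_ definition above) =====
theorem preprocess_corpus_spec : Claim_equal_preprocess_corpus := by
  intro corpus _
  unfold Spec_preprocess_corpus preprocess_corpus preprocess_corpus_alt
  cases corpus with
  | none => rfl
  | some xs =>
    by_cases h : xs = []
    · simp [h]
    · simp only [if_neg h]
      exact congrArg some (List.map_congr_left fun e _ => entry_eq e)
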